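-- pv_equiv track=rewrite | github.com/rafaelGuasselli/exercicios | beecrowd/2298.py | cartasIguais
-- ===== SOURCE A (Python) =====
-- def cartasIguais(cartas):
-- 	index = {}
-- 	frequencias = []
--
-- 	for i in range(0, len(cartas)):
-- 		carta = cartas[i]
-- 		if carta not in index:
-- 			frequencias.append([1, carta])
-- 			index[carta] = len(frequencias) - 1
-- 		else:
-- 			frequencias[index[carta]][0] += 1
--
-- 	frequencias.sort(reverse=True)
-- 	cartaMaisFrequente = frequencias[0][1]
-- 	segundaCartaMaisFrequente = frequencias[1][1]
--
-- 	maiorFrequencia = frequencias[0][0]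
-- 	segundaMaiorFrequencia = frequencias[1][0]
--
-- 	if maiorFrequencia == 4:
-- 		return 180 + cartaMaisFrequente
-- 	elif maiorFrequencia == 3 and segundaMaiorFrequencia == 2:
-- 		return 160 + cartaMaisFrequente
-- 	elif maiorFrequencia == 3:
-- 		return 140 + cartaMaisFrequente
-- 	elif maiorFrequencia == 2 and segundaMaiorFrequencia == 2:
-- 		return 3 * cartaMaisFrequente + 2 * segundaCartaMaisFrequente + 20
-- 	elif maiorFrequencia == 2:
-- 		return cartaMaisFrequente
-- 	else:
-- 		return 0
-- ===== SOURCE B (Python) =====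
-- def cartasIguais(cartas):
-- 	# sort-and-group: sort a copy, collapse consecutive equal runs into
-- 	# (count, card) pairs (no hash table), then order the pairs by
-- 	# (count, card) descending and score the top two, exactly as the original.
-- 	s = sorted(cartas)
-- 	pares = []
-- 	for c in s:
-- 		if pares and pares[-1][1] == c:
-- 			pares[-1] = (pares[-1][0] + 1, c)
-- 		else:
-- 			pares.append((1, c))
-- 	pares.sort(reverse=True)
-- 	maiorFrequencia, cartaMaisFrequente = pares[0]
-- 	segundaMaiorFrequencia, segundaCartaMaisFrequente = pares[1]
--
-- 	if maiorFrequencia == 4: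
-- 		return 180 + cartaMaisFrequente
-- 	elif maiorFrequencia == 3 and segundaMaiorFrequencia == 2:
-- 		return 160 + cartaMaisFrequente
-- 	elif maiorFrequencia == 3:
-- 		return 140 + cartaMaisFrequente
-- 	elif maiorFrequencia == 2 and segundaMaiorFrequencia == 2:
-- 		return 3 * cartaMaisFrequente + 2 * segundaCartaMaisFrequente + 20
-- 	elif maiorFrequencia == 2:
-- 		return cartaMaisFrequente
-- 	else:
-- 		return 0
-- ===== Notes on version B (the rewrite author's own statement) =====
-- stated objective: alternative
-- what changed: B replaces A's dict-of-first-occurrence-positions frequency counting with sort-then-group: it sorts a copy of the hand, collapses consecutive equal runs into (count, card) pairs, then sorts the pairs descending and applies the same scoring branches.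
import Mathlib
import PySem

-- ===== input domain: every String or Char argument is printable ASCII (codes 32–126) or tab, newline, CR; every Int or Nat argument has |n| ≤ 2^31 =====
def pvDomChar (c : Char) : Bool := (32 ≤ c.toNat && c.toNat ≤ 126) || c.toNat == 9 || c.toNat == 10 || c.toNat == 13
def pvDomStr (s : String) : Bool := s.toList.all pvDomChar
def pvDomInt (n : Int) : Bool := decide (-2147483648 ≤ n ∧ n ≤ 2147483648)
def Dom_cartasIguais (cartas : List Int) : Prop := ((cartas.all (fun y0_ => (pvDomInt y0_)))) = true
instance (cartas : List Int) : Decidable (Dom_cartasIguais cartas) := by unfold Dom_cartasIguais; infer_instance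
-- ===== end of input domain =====

-- B changes the algorithm (sort-then-group instead of dict counting); same scoring, same values.

-- ===== PORT A =====
-- loop body: 'for i in range(0, len(cartas)): carta = cartas[i]; …' visits exactly the
-- elements of cartas in order, so it is a fold over cartas.  index maps a card to the
-- position of its [count, card] entry in frequencias; positions are lengths (Nat).
def pvStepA (st : PySem.Dict Int Nat × List (Int × Int)) (carta : Int) :
    PySem.Dict Int Nat × List (Int × Int) :=
  if st.1.contains carta = false then
    -- frequencias.append([1, carta]); index[carta] = len(frequencias) - 1
    let freq := st.2 ++ [(1, carta)]
    (st.1.insert carta (freq.length - 1), freq)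
  else
    -- frequencias[index[carta]][0] += 1
    (st.1, st.2.modify (st.1.getD carta 0) (fun p => (p.1 + 1, p.2)))

def cartasIguais (cartas : List Int) : Int :=
  let st := cartas.foldl pvStepA (PySem.Dict.empty, ([] : List (Int × Int)))
  -- frequencias.sort(reverse=True): Python compares the [count, card] 2-lists lexicographically
  let fs := PySem.List.sorted2 st.2 (fun p => p.1) (fun p => p.2) true
  match PySem.List.pyGet? fs 0, PySem.List.pyGet? fs 1 with
  | some p0, some p1 =>
    if p0.1 == 4 then 180 + p0.2
    else if p0.1 == 3 && p1.1 == 2 then 160 + p0.2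
    else if p0.1 == 3 then 140 + p0.2
    else if p0.1 == 2 && p1.1 == 2 then 3 * p0.2 + 2 * p1.2 + 20
    else if p0.1 == 2 then p0.2
    else 0
  | _, _ => 0   -- IndexError in Python (fewer than 2 distinct cards); excluded by Pre_

-- ===== PORT B =====
-- 'if pares and pares[-1][1] == c: pares[-1] = (pares[-1][0] + 1, c) else: pares.append((1, c))'
def pvStepB (ps : List (Int × Int)) (c : Int) : List (Int × Int) :=
  match ps.getLast? with
  | some p => if p.2 == c then ps.dropLast ++ [(p.1 + 1, c)] else ps ++ [(1, c)]
  | none => ps ++ [(1, c)]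

def cartasIguais_alt (cartas : List Int) : Int :=
  let s := PySem.List.sorted cartas (fun x => x) false
  let pares := s.foldl pvStepB []
  -- pares.sort(reverse=True): lexicographic on the (count, card) tuples
  let fs := PySem.List.sorted2 pares (fun p => p.1) (fun p => p.2) true
  match PySem.List.pyGet? fs 0 with
  | none => 0   -- IndexError in Python; excluded by Pre_
  | some p0 =>
    match PySem.List.pyGet? fs 1 with
    | none => 0   -- IndexError in Python; excluded by Pre_
    | some p1 =>
      if p0.1 == 4 then 180 + p0.2
      else if p0.1 == 3 && p1.1 == 2 then 160 + p0.2
      else if p0.1 == 3 then 140 + p0.2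
      else if p0.1 == 2 && p1.1 == 2 then 3 * p0.2 + 2 * p1.2 + 20
      else if p0.1 == 2 then p0.2
      else 0

-- ===== PRECONDITION & SPEC =====
-- Pre_ excludes exactly the hands with fewer than two distinct cards, on which the Python A
-- (and the Python B alike) raises IndexError reading the second (count, card) entry.
def Pre_cartasIguais (cartas : List Int) : Prop := 2 ≤ (PySem.List.dedup cartas).length
instance (cartas : List Int) : Decidable (Pre_cartasIguais cartas) := by
  unfold Pre_cartasIguais; infer_instance
def pvWitness_cartasIguais : List Int := [7, 7, 3]

def Spec_cartasIguais (cartas : List Int) (out : Int) : Prop := out = cartasIguais_alt cartas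
instance (cartas : List Int) (out : Int) : Decidable (Spec_cartasIguais cartas out) := by
  unfold Spec_cartasIguais; infer_instance

-- ===== CLAIM (what is proved, stated in full; the proofs are below) =====
def Claim_equal_cartasIguais : Prop := ∀ (cartas : List Int), Dom_cartasIguais cartas → Pre_cartasIguais cartas → Spec_cartasIguais cartas (cartasIguais cartas)

-- ===== LEMMAS AND PROOFS =====

-- Python's tuple/2-list comparison is the lexicographic order: sorted2 on (.1, .2) is
-- sorted with the Lex (Int × Int) key.
theorem pv_lt_lex (p q : Int × Int) :
    (decide (p.1 < q.1) || (!decide (q.1 < p.1) && decide (p.2 < q.2)))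
      = decide (toLex p < toLex q) := by
  simp only [Prod.Lex.lt_iff, ofLex_toLex]
  by_cases h1 : p.1 < q.1
  · simp [h1]
  · by_cases h2 : q.1 < p.1
    · simp [h1, h2, ne_of_gt h2]
    · simp [le_antisymm (not_lt.mp h2) (not_lt.mp h1)]

theorem pv_sorted2_eq_sorted_toLex (xs : List (Int × Int)) :
    PySem.List.sorted2 xs (fun p => p.1) (fun p => p.2) true
      = PySem.List.sorted xs (fun p => toLex p) true := by
  unfold PySem.List.sorted2 PySem.List.sorted
  simp only [if_pos]
  congr 1
  funext acc x
  congr 1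
  funext a b
  exact pv_lt_lex b a

-- the multiset both ports sort: one (count, card) pair per distinct card
def pvPairs (l : List Int) : List (Int × Int) :=
  (PySem.List.dedup l).map (fun c => ((l.count c : Int), c))

theorem pv_dedup_append (l : List Int) (a : Int) :
    PySem.List.dedup (l ++ [a])
      = if a ∈ l then PySem.List.dedup l else PySem.List.dedup l ++ [a] := by
  simp only [PySem.List.dedup_eq_ofList, PySem.Set.ofList_append_singleton]
  by_cases h : a ∈ l
  · rw [PySem.Set.add_of_mem (by rwa [PySem.Set.mem_ofList]), if_pos h]
  · rw [PySem.Set.add_of_not_mem (by rwa [PySem.Set.mem_ofList]), if_neg h]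

theorem pv_dedup_sublist (l : List Int) : (PySem.List.dedup l).Sublist l := by
  induction l using List.reverseRecOn with
  | nil => simp [PySem.List.dedup_eq_ofList, PySem.Set.ofList]
  | append_singleton l a ih =>
    rw [pv_dedup_append]
    by_cases h : a ∈ l
    · rw [if_pos h]; exact ih.trans (List.sublist_append_left l [a])
    · rw [if_neg h]; exact ih.append (List.Sublist.refl [a])

theorem pv_dedup_nodup (l : List Int) : (PySem.List.dedup l).Nodup :=
  PySem.List.dedup_eq_ofList l ▸ PySem.Set.nodup_ofList l

theorem pv_count_append_ne (l : List Int) (a c : Int) (h : c ≠ a) :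
    (l ++ [a]).count c = l.count c := by
  simp [List.count_append, Ne.symm h]

theorem pv_count_append_self (l : List Int) (a : Int) :
    (l ++ [a]).count a = l.count a + 1 := by
  simp [List.count_append]

theorem pv_modify_map (dl : List Int) (hnd : dl.Nodup) (l : List Int) (a : Int) (ha : a ∈ dl) :
    (dl.map (fun c => ((l.count c : Int), c))).modify (List.idxOf a dl)
        (fun p => (p.1 + 1, p.2))
      = dl.map (fun c => (((l ++ [a]).count c : Int), c)) := by
  apply List.ext_getElem
  · simp [List.length_modify]
  · intro j h1 h2
    have hj : j < dl.length := by simpa using h2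
    rw [List.getElem_modify]
    simp only [List.getElem_map]
    have hlt := List.idxOf_lt_length_of_mem ha
    by_cases hij : List.idxOf a dl = j
    · subst hij
      have hda : dl[List.idxOf a dl] = a := List.getElem_idxOf hlt
      simp only [hda, pv_count_append_self]
      push_cast
      ring_nf
    · have hne : dl[j] ≠ a := by
        intro hda
        exact hij ((List.Nodup.getElem_inj_iff hnd).mp
          (show dl[List.idxOf a dl]'hlt = dl[j]'hj by rw [List.getElem_idxOf hlt, hda]))
      rw [if_neg hij, pv_count_append_ne _ _ _ hne]

theorem pv_A_inv (l : List Int) :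
    ((l.foldl pvStepA (PySem.Dict.empty, ([] : List (Int × Int)))).2
        = (PySem.List.dedup l).map (fun c => ((l.count c : Int), c)))
    ∧ (∀ c : Int, (l.foldl pvStepA (PySem.Dict.empty, ([] : List (Int × Int)))).1.contains c
        = decide (c ∈ l))
    ∧ (∀ c : Int, c ∈ l →
        (l.foldl pvStepA (PySem.Dict.empty, ([] : List (Int × Int)))).1.getD c 0
          = List.idxOf c (PySem.List.dedup l)) := by
  induction l using List.reverseRecOn with
  | nil =>
    refine ⟨rfl, ?_, ?_⟩
    · intro c; simp [PySem.Dict.contains_empty]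
    · intro c hc; simp at hc
  | append_singleton l a ih =>
    obtain ⟨hfq, hc, hg⟩ := ih
    rw [List.foldl_append] at *
    simp only [List.foldl_cons, List.foldl_nil]
    set st := l.foldl pvStepA (PySem.Dict.empty, ([] : List (Int × Int))) with hst
    by_cases hmem : a ∈ l
    · have hca : st.1.contains a = true := by rw [hc]; simpa
      have hstep : pvStepA st a
          = (st.1, st.2.modify (st.1.getD a 0) (fun p => (p.1 + 1, p.2))) := by
        unfold pvStepA; rw [hca]; simp
      rw [hstep]
      have hdl : PySem.List.dedup (l ++ [a]) = PySem.List.dedup l := by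
        rw [pv_dedup_append, if_pos hmem]
      refine ⟨?_, ?_, ?_⟩
      · rw [hfq, hg a hmem, hdl]
        exact pv_modify_map _ (PySem.List.dedup_eq_ofList l ▸ PySem.Set.nodup_ofList l) l a
          ((PySem.List.mem_dedup l a).mpr hmem)
      · intro c
        rw [hc]
        by_cases hca2 : c = a
        · subst hca2; simp [hmem]
        · simp [hca2]
      · intro c hcl
        rw [hdl]
        apply hg
        rcases List.mem_append.mp hcl with h | h
        · exact h
        · simp at h; subst h; exact hmem
    · have hca : st.1.contains a = false := by rw [hc]; simpa
      have hstep : pvStepA st a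
          = (st.1.insert a ((st.2 ++ [(1, a)]).length - 1), st.2 ++ [(1, a)]) := by
        unfold pvStepA; rw [hca]; simp
      rw [hstep]
      have hdl : PySem.List.dedup (l ++ [a]) = PySem.List.dedup l ++ [a] := by
        rw [pv_dedup_append, if_neg hmem]
      have hlen : (st.2 ++ [(1, a)]).length - 1 = (PySem.List.dedup l).length := by
        simp [hfq]
      refine ⟨?_, ?_, ?_⟩
      · have h1 : List.map (fun c => (((l ++ [a]).count c : Int), c)) (PySem.List.dedup l)
            = List.map (fun c => ((l.count c : Int), c)) (PySem.List.dedup l) :=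
          List.map_congr_left (fun c hcd => by
            have hcna : c ≠ a := fun h => hmem (h ▸ (PySem.List.mem_dedup l c).mp hcd)
            rw [pv_count_append_ne _ _ _ hcna])
        have h2 : l.count a = 0 := List.count_eq_zero.mpr hmem
        rw [hfq, hdl, List.map_append, h1]
        simp [h2]
      · intro c
        rw [PySem.Dict.contains_insert, hc]
        by_cases hca2 : c = a
        · subst hca2; simp
        · simp [hca2]
      · intro c hcl
        rw [hlen, PySem.Dict.getD_insert, hdl, List.idxOf_append]
        by_cases hca2 : c = a
        · subst hca2
          rw [if_pos rfl, if_neg (fun h => hmem ((PySem.List.mem_dedup l c).mp h))]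
          simp [List.idxOf]
        · have hcli : c ∈ l := by
            rcases List.mem_append.mp hcl with h | h
            · exact h
            · simp at h; exact absurd h hca2
          rw [if_neg hca2, if_pos ((PySem.List.mem_dedup l c).mpr hcli)]
          exact hg c hcli

theorem pv_A_loop (l : List Int) :
    (l.foldl pvStepA (PySem.Dict.empty, ([] : List (Int × Int)))).2 = pvPairs l :=
  (pv_A_inv l).1

theorem pv_B_loop (l : List Int) (h : l.Pairwise (· ≤ ·)) :
    l.foldl pvStepB [] = (PySem.List.dedup l).map (fun c => ((l.count c : Int), c)) := by
  induction l using List.reverseRecOn with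
  | nil => rfl
  | append_singleton l a ih =>
    obtain ⟨hl, -, hla0⟩ := List.pairwise_append.mp h
    have hla : ∀ x ∈ l, x ≤ a := fun x hx => hla0 x hx a (by simp)
    rw [List.foldl_append, List.foldl_cons, List.foldl_nil, ih hl]
    have hnd : (PySem.List.dedup l).Nodup := pv_dedup_nodup l
    by_cases hl0 : l = []
    · subst hl0
      simp [pvStepB, PySem.List.dedup_eq_ofList, PySem.Set.ofList, PySem.Set.add,
        PySem.Set.empty, List.count_cons]
    · obtain ⟨x, hx⟩ := List.exists_mem_of_ne_nil l hl0
      have hdne : (PySem.List.dedup l).reverse ≠ [] := by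
        intro h0
        have : x ∈ PySem.List.dedup l := (PySem.List.mem_dedup l x).mpr hx
        rw [List.reverse_eq_nil_iff.mp h0] at this
        simp at this
      rcases hrev : (PySem.List.dedup l).reverse with _ | ⟨m, t'⟩
      · exact absurd hrev hdne
      · have hdleq : PySem.List.dedup l = t'.reverse ++ [m] := by
          rw [← List.reverse_reverse (PySem.List.dedup l), hrev, List.reverse_cons]
        have hmdl : m ∈ PySem.List.dedup l := by
          rw [← List.mem_reverse, hrev]; simp
        have hml : m ∈ l := (PySem.List.mem_dedup l m).mp hmdl
        have hpw : List.Pairwise (fun x y => y ≤ x) (m :: t') := by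
          rw [← hrev, List.pairwise_reverse]
          exact List.Pairwise.sublist (pv_dedup_sublist l) hl
        have hndr : (m :: t').Nodup := by rw [← hrev]; exact List.nodup_reverse.mpr hnd
        have hmax : ∀ y ∈ l, y ≤ m := by
          intro y hy
          have hydl : y ∈ (PySem.List.dedup l).reverse := by
            rw [List.mem_reverse, PySem.List.mem_dedup]; exact hy
          rw [hrev] at hydl
          rcases List.mem_cons.mp hydl with hye | hyt
          · exact le_of_eq hye
          · exact List.rel_of_pairwise_cons hpw hyt
        have hiff : a ∈ l ↔ m = a :=
          ⟨fun hal => le_antisymm (hla m hml) (hmax a hal), fun he => he ▸ hml⟩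
        have htl : ∀ y ∈ t'.reverse, y ∈ l := by
          intro y hy
          rw [List.mem_reverse] at hy
          have : y ∈ (PySem.List.dedup l).reverse := by rw [hrev]; simp [hy]
          rw [List.mem_reverse] at this
          exact (PySem.List.mem_dedup l y).mp this
        have hst : (t'.reverse ++ [m]).map (fun c => ((l.count c : Int), c))
            = t'.reverse.map (fun c => ((l.count c : Int), c)) ++ [((l.count m : Int), m)] := by
          simp
        by_cases hal : a ∈ l
        · have hma : m = a := hiff.mp hal
          have hdl : PySem.List.dedup (l ++ [a]) = PySem.List.dedup l := by
            rw [pv_dedup_append, if_pos hal]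
          rw [hdl, hdleq]
          subst hma
          simp only [pvStepB, hst, List.getLast?_concat, beq_self_eq_true, if_pos,
            List.dropLast_concat, List.map_append, List.map_cons, List.map_nil]
          congr 1
          · apply (List.map_congr_left _).symm
            intro y hy
            have hym : y ≠ m := fun he => (List.nodup_cons.mp hndr).1 (by
              rw [← he]; exact List.mem_reverse.mp (he ▸ hy))
            rw [pv_count_append_ne _ _ _ hym]
          · rw [pv_count_append_self]; push_cast; rfl
        · have hma : m ≠ a := fun he => hal (hiff.mpr he)
          have hdl : PySem.List.dedup (l ++ [a]) = PySem.List.dedup l ++ [a] := by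
            rw [pv_dedup_append, if_neg hal]
          rw [hdl, hdleq]
          simp only [pvStepB, hst, List.getLast?_concat]
          rw [if_neg (by simp [hma])]
          have hca : (l ++ [a]).count a = 1 := by
            rw [pv_count_append_self, List.count_eq_zero.mpr hal]
          simp only [List.map_append, List.map_cons, List.map_nil, List.append_assoc]
          congr 1
          · apply (List.map_congr_left _).symm
            intro y hy
            have hya : y ≠ a := fun he => hal (he ▸ htl y hy)
            rw [pv_count_append_ne _ _ _ hya]
          · rw [pv_count_append_ne _ _ _ hma]
            simp [hca]

theorem pv_fs_eq (cartas : List Int) :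
    PySem.List.sorted2 ((cartas.foldl pvStepA (PySem.Dict.empty, ([] : List (Int × Int)))).2)
        (fun p => p.1) (fun p => p.2) true
      = PySem.List.sorted2 ((PySem.List.sorted cartas (fun x => x) false).foldl pvStepB [])
        (fun p => p.1) (fun p => p.2) true := by
  rw [pv_sorted2_eq_sorted_toLex, pv_sorted2_eq_sorted_toLex, pv_A_loop]
  have hsp : (PySem.List.sorted cartas (fun x => x) false).Perm cartas :=
    PySem.List.sorted_perm cartas (fun x => x) false
  have hspw : (PySem.List.sorted cartas (fun x => x) false).Pairwise (· ≤ ·) :=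
    PySem.List.sorted_pairwise cartas (fun x => x)
  rw [pv_B_loop _ hspw]
  have hcnt : (fun c : Int => (((PySem.List.sorted cartas (fun x => x) false).count c : Int), c))
      = (fun c : Int => ((cartas.count c : Int), c)) := by
    funext c
    rw [hsp.count_eq]
  rw [hcnt]
  have hginj : Function.Injective (fun c : Int => ((cartas.count c : Int), c)) :=
    fun c1 c2 h => (Prod.mk.injEq _ _ _ _ ▸ h : _ ∧ _).2
  have hndA : (pvPairs cartas).Nodup := (pv_dedup_nodup cartas).map hginj
  have hperm : ((PySem.List.dedup (PySem.List.sorted cartas (fun x => x) false)).map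
      (fun c => ((cartas.count c : Int), c))).Perm (pvPairs cartas) := by
    apply List.Perm.map
    rw [List.perm_ext_iff_of_nodup
      (pv_dedup_nodup (PySem.List.sorted cartas (fun x => x) false)) (pv_dedup_nodup cartas)]
    intro c
    rw [PySem.List.mem_dedup, PySem.List.mem_dedup, hsp.mem_iff]
  have hkinj : Function.Injective (fun p : Int × Int => toLex p) :=
    fun p q h => toLex.injective h
  have h1 : (PySem.List.sorted (pvPairs cartas) (fun p => toLex p) true).Perm (pvPairs cartas) :=
    PySem.List.sorted_perm _ _ true
  have hysnd : (PySem.List.sorted (pvPairs cartas) (fun p => toLex p) true).Nodup :=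
    h1.nodup_iff.mpr hndA
  have hle := PySem.List.sorted_pairwise_rev (pvPairs cartas) (fun p => toLex p)
  have hgt : (PySem.List.sorted (pvPairs cartas) (fun p => toLex p) true).Pairwise
      (fun a b => toLex b < toLex a) := by
    refine (hysnd.and hle).imp ?_
    rintro a b ⟨hne, hleab⟩
    exact lt_of_le_of_ne hleab (fun heq => hne (hkinj heq).symm)
  exact (PySem.List.sorted_rev_eq_of_perm_of_pairwise_gt _ _ _
    (h1.trans hperm.symm) hgt).symm

-- ===== VERDICT (by name: the statement is the Claim_ definition above) =====
theorem cartasIguais_spec : Claim_equal_cartasIguais := by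
  intro cartas _ _
  simp only [Spec_cartasIguais, cartasIguais, cartasIguais_alt]
  rw [pv_fs_eq]
  generalize PySem.List.sorted2
      ((PySem.List.sorted cartas (fun x => x) false).foldl pvStepB [])
      (fun p => p.1) (fun p => p.2) true = fs
  rcases PySem.List.pyGet? fs 0 with _ | p0
  · rfl
  · rcases PySem.List.pyGet? fs 1 with _ | p1 <;> rfl
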